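-- pv_equiv track=rewrite | github.com/shk0824/baekjoon-step-by-step-challenge | Algorithms/Quiz02/Hanbit(1-3).py | chooseTime
-- ===== SOURCE A (Python) =====
-- def chooseTime(sched):
--     count=0
--     max=0
--     times=0
--     for c in sched:
--         if c[1]=="start":
--             count+=1
--         else:
--             count-=1
--         if max<count:
--             max=count
--             times=c[0]
--     return max,times
-- ===== SOURCE B (Python) =====
-- from itertools import accumulate
--
--
-- def chooseTime(sched):
--     # Build the prefix-count table, take its maximum, then find the first
--     # event whose cumulative count equals that maximum.
--     acc = list(accumulate((1 if s == "start" else -1) for _, s in sched))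
--     m = max(acc, default=0)
--     if m <= 0:
--         return 0, 0
--     for (t, _), v in zip(sched, acc):
--         if v == m:
--             return m, t
-- ===== Notes on version B (the rewrite author's own statement) =====
-- stated objective: alternative
-- what changed: Replaces A's single interleaved pass (running count with strict max/time updates) by a build-then-scan decomposition: materialise the cumulative-count table with itertools.accumulate, take max(acc, default=0), and scan zip(sched, acc) for the first event reaching that maximum.
import Mathlib
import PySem

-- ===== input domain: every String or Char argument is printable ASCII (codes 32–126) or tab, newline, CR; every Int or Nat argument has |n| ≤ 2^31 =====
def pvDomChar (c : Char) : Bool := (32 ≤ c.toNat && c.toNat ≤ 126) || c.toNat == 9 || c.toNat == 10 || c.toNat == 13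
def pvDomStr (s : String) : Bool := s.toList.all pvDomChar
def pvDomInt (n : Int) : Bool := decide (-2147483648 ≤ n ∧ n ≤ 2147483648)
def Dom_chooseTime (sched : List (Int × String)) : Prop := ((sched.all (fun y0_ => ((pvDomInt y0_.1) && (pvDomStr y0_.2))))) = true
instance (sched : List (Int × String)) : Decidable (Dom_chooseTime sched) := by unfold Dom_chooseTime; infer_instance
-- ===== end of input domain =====

-- B rebuilds the answer from a materialised prefix-count table (accumulate, max, scan)
-- instead of A's single interleaved pass; objective: alternative decomposition, same cost.

-- ===== PORT A =====
-- the loop body of A: update count, then strictly update (max, times)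
def pvStepA (st : Int × Int × Int) (c : Int × String) : Int × Int × Int :=
  let count := if c.2 == "start" then st.1 + 1 else st.1 - 1
  if st.2.1 < count then (count, count, c.1) else (count, st.2.1, st.2.2)

def chooseTime (sched : List (Int × String)) : Int × Int :=
  let r := sched.foldl pvStepA (0, 0, 0)
  (r.2.1, r.2.2)

-- ===== PORT B =====
-- list(accumulate(1 if s == "start" else -1 for _, s in sched)), prefix sums from s
def pvAccB (s : Int) : List (Int × String) → List Int
  | [] => []
  | c :: t =>
    let s' := s + (if c.2 == "start" then 1 else -1)
    s' :: pvAccB s' t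

-- the 'for (t, _), v in zip(sched, acc): if v == m: return m, t' loop;
-- the nil case is unreachable in B (the loop is only run when m ∈ acc)
def pvLoopB (m : Int) : List ((Int × String) × Int) → Int × Int
  | [] => (0, 0)
  | (c, v) :: t => if v == m then (m, c.1) else pvLoopB m t

def chooseTime_alt (sched : List (Int × String)) : Int × Int :=
  let acc := pvAccB 0 sched
  let m := PySem.List.maxD acc (fun x => x) 0
  if m ≤ 0 then (0, 0) else pvLoopB m (sched.zip acc)

-- ===== PRECONDITION & SPEC =====
def Spec_chooseTime (sched : List (Int × String)) (out : Int × Int) : Prop := out = chooseTime_alt sched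
instance (sched : List (Int × String)) (out : Int × Int) : Decidable (Spec_chooseTime sched out) := by unfold Spec_chooseTime; infer_instance

-- ===== CLAIM (what is proved, stated in full; the proofs are below) =====
def Claim_equal_chooseTime : Prop := ∀ (sched : List (Int × String)), Dom_chooseTime sched → Spec_chooseTime sched (chooseTime sched)

-- ===== LEMMAS AND PROOFS =====

-- folding max after seeding with `max a b` is the same as maxing `a` in afterwards
lemma pv_foldl_max_shift (l : List Int) : ∀ (a b : Int),
    l.foldl max (max a b) = max a (l.foldl max b) := by
  induction l with
  | nil => intro a b; simp
  | cons x t ih =>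
    intro a b
    simp only [List.foldl_cons]
    rw [show max (max a b) x = max a (max b x) from max_assoc a b x, ih]

lemma pv_accB_length (sched : List (Int × String)) : ∀ s, (pvAccB s sched).length = sched.length := by
  induction sched with
  | nil => intro s; simp [pvAccB]
  | cons c t ih => intro s; simp [pvAccB, ih]

-- the scan loop hits when m occurs among the zipped values
lemma pv_loopB_hit (m : Int) : ∀ (sched : List (Int × String)) (acc : List Int),
    sched.length = acc.length → m ∈ acc →
    pvLoopB m (sched.zip acc) = (m, (pvLoopB m (sched.zip acc)).2) := by
  intro sched
  induction sched with
  | nil =>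
    intro acc hlen hm
    cases acc with
    | nil => simp at hm
    | cons v a => simp at hlen
  | cons c t ih =>
    intro acc hlen hm
    cases acc with
    | nil => simp at hlen
    | cons v a =>
      simp only [List.zip_cons_cons, pvLoopB]
      by_cases hv : v == m
      · simp [hv]
      · have hvm : v ≠ m := by simpa using hv
        have hm' : m ∈ a := by
          rcases List.mem_cons.mp hm with h | h
          · exact absurd h.symm hvm
          · exact h
        simp only [hv]
        exact ih a (by simpa using hlen) hm'

-- main loop characterisation of A's fold in terms of B's prefix-count table
lemma pv_loopA_eq (sched : List (Int × String)) : ∀ (c mx tm : Int),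
    (sched.foldl pvStepA (c, mx, tm)).2 =
    ((pvAccB c sched).foldl max mx,
     if (pvAccB c sched).foldl max mx ≤ mx then tm
     else (pvLoopB ((pvAccB c sched).foldl max mx) (sched.zip (pvAccB c sched))).2) := by
  induction sched with
  | nil => intro c mx tm; simp [pvAccB]
  | cons h t ih =>
    intro c mx tm
    set c' := if h.2 == "start" then c + 1 else c - 1 with hc'
    have hstep : pvStepA (c, mx, tm) h =
        if mx < c' then (c', c', h.1) else (c', mx, tm) := rfl
    have hacc : pvAccB c (h :: t) = c' :: pvAccB c' t := by
      simp only [pvAccB, hc']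
      by_cases hs : h.2 == "start" <;> simp [hs, sub_eq_add_neg]
    rw [List.foldl_cons, hstep, hacc]
    by_cases hlt : mx < c'
    · rw [if_pos hlt]
      have hM : (c' :: pvAccB c' t).foldl max mx = (pvAccB c' t).foldl max c' := by
        simp only [List.foldl_cons]
        rw [max_eq_right (le_of_lt hlt)]
      rw [hM, ih c' c' h.1]
      set M := (pvAccB c' t).foldl max c' with hMdef
      have hc'M : c' ≤ M := (PySem.List.le_foldl_max _ _).1
      have hMmx : ¬ M ≤ mx := by omega
      refine Prod.ext rfl ?_
      simp only [if_neg hMmx, List.zip_cons_cons, pvLoopB]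
      by_cases hle : M ≤ c'
      · have hEq : c' = M := le_antisymm hc'M hle
        simp [hEq]
      · have hne : (c' == M) = false := by
          simp only [beq_eq_false_iff_ne]; omega
        simp [if_neg hle, hne]
    · rw [if_neg hlt]
      have hM : (c' :: pvAccB c' t).foldl max mx = (pvAccB c' t).foldl max mx := by
        simp only [List.foldl_cons]
        rw [max_eq_left (by omega)]
      rw [hM, ih c' mx tm]
      set M := (pvAccB c' t).foldl max mx with hMdef
      refine Prod.ext rfl ?_
      by_cases hle : M ≤ mx
      · simp [if_pos hle]
      · have hne : (c' == M) = false := by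
          simp only [beq_eq_false_iff_ne]; omega
        simp [if_neg hle, List.zip_cons_cons, pvLoopB, hne]

-- ===== VERDICT (by name: the statement is the Claim_ definition above) =====
theorem chooseTime_spec : Claim_equal_chooseTime := by
  intro sched _
  unfold Spec_chooseTime
  simp only [chooseTime, chooseTime_alt]
  rw [pv_loopA_eq sched 0 0 0]
  cases hacc : pvAccB 0 sched with
  | nil =>
    simp [PySem.List.maxD, PySem.List.max?]
  | cons x a =>
    have hmaxD : PySem.List.maxD (x :: a) (fun y => y) 0 = a.foldl max x := by
      simp [PySem.List.maxD, PySem.List.max?_id_cons]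
    set m := a.foldl max x with hm
    have hM : (x :: a).foldl max 0 = max 0 m := by
      simp only [List.foldl_cons]
      exact pv_foldl_max_shift a 0 x
    rw [hM, hmaxD]
    by_cases hle : m ≤ 0
    · rw [show max (0 : Int) m = 0 by omega, if_pos (by omega : (0:Int) ≤ 0), if_pos hle]
    · have hmem : m ∈ (x :: a) := by
        rcases PySem.List.foldl_max_mem a x with h | h
        · rw [hm, h]; exact List.mem_cons_self
        · exact List.mem_cons_of_mem x (hm ▸ h)
      have hhit := pv_loopB_hit m sched (x :: a)
        (by rw [← hacc, pv_accB_length]) hmem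
      rw [show max (0 : Int) m = m by omega, if_neg hle, if_neg hle]
      exact hhit.symm
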